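-- pv_equiv track=rewrite | github.com/ZentyNhan/Freelance_Project | Spotify/SPOTIFYServer/login/views.py | id_gen
-- ===== SOURCE A (Python) =====
-- def id_gen(mode_, list_):
--     ID = []
--     data = list_
--     for i in data:
--         ID.append(i['id'])
--     if mode_ == 'new':
--         if ID == []: id = 0
--         else:        id = max(ID) + 1
--     elif mode_ == 'max':
--         if ID == []: id = 0
--         else:        id = max(ID)
--     else:
--         if ID == []: id = 0
--         else:        id = min(ID)
--     return id
-- ===== SOURCE B (Python) =====
-- def id_gen(mode_, list_):
--     hi = lo = None
--     for rec in list_: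
--         v = rec['id']
--         if hi is None:
--             hi = lo = v
--         else:
--             if v > hi: hi = v
--             if v < lo: lo = v
--     if hi is None:
--         return 0
--     if mode_ == 'new':
--         return hi + 1
--     if mode_ == 'max':
--         return hi
--     return lo
-- ===== Notes on version B (the rewrite author's own statement) =====
-- stated objective: alternative
-- what changed: Single pass with two scalar running extrema (seeded from the first id) instead of materialising the full ID list and calling max()/min() on it; the mode branch moves after the loop.
import Mathlib
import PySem

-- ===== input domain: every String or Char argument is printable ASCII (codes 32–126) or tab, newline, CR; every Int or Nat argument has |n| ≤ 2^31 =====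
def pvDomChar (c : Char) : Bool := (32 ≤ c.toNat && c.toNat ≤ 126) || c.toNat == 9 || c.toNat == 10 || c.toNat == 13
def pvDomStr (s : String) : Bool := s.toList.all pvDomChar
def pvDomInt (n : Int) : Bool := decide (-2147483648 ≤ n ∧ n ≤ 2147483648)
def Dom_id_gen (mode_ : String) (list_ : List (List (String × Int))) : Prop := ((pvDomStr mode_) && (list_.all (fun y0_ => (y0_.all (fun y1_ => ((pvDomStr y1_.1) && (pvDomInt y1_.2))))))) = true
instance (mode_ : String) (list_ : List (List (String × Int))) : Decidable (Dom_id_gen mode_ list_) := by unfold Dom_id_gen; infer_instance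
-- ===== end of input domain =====

-- B is a single pass with two scalar running extrema instead of building the full ID
-- list and scanning it again with max()/min(); same results, no speed claim.

-- ===== PORT A =====
-- i['id'] on the dict built from the association list (last duplicate wins, as in Python's dict());
-- Pre_ guarantees the key is present, so the .getD 0 default is never used on admitted inputs.
def pvIdOf (i : List (String × Int)) : Int := ((PySem.Dict.ofList i).get? "id").getD 0

def id_gen (mode_ : String) (list_ : List (List (String × Int))) : Int :=
  let ID := list_.foldl (fun acc i => acc ++ [pvIdOf i]) []
  if mode_ == "new" then
    if ID == [] then 0 else (PySem.List.max? ID (fun x => x)).getD 0 + 1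
  else if mode_ == "max" then
    if ID == [] then 0 else (PySem.List.max? ID (fun x => x)).getD 0
  else
    if ID == [] then 0 else (PySem.List.min? ID (fun x => x)).getD 0

-- ===== PORT B =====
def pvStep (st : Option (Int × Int)) (rec : List (String × Int)) : Option (Int × Int) :=
  let v := pvIdOf rec
  match st with
  | none => some (v, v)
  | some (hi, lo) => some ((if v > hi then v else hi), (if v < lo then v else lo))

def id_gen_alt (mode_ : String) (list_ : List (List (String × Int))) : Int :=
  let st := list_.foldl pvStep none
  match st with
  | none => 0
  | some (hi, lo) =>
    if mode_ == "new" then hi + 1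
    else if mode_ == "max" then hi
    else lo

-- ===== PRECONDITION & SPEC =====
-- A does i['id'] on every element: Pre_ excludes exactly the inputs where some element
-- has no 'id' key, on which the Python raises KeyError (B raises there too).
def Pre_id_gen (mode_ : String) (list_ : List (List (String × Int))) : Prop :=
  list_.all (fun d => d.any (fun p => p.1 == "id")) = true
instance (mode_ : String) (list_ : List (List (String × Int))) : Decidable (Pre_id_gen mode_ list_) := by unfold Pre_id_gen; infer_instance
def pvWitness_id_gen : String × (List (List (String × Int))) := ("new", [[("id", 3)], [("id", -1), ("x", 7)]])

def Spec_id_gen (mode_ : String) (list_ : List (List (String × Int))) (out : Int) : Prop := out = id_gen_alt mode_ list_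
instance (mode_ : String) (list_ : List (List (String × Int))) (out : Int) : Decidable (Spec_id_gen mode_ list_ out) := by unfold Spec_id_gen; infer_instance

-- ===== CLAIM (what is proved, stated in full; the proofs are below) =====
def Claim_equal_id_gen : Prop := ∀ (mode_ : String) (list_ : List (List (String × Int))), Dom_id_gen mode_ list_ → Pre_id_gen mode_ list_ → Spec_id_gen mode_ list_ (id_gen mode_ list_)

-- ===== LEMMAS AND PROOFS =====

-- A's append-loop builds exactly the map of pvIdOf.
theorem pv_foldl_append_eq_map (l : List (List (String × Int))) (acc : List Int) :
    l.foldl (fun acc i => acc ++ [pvIdOf i]) acc = acc ++ l.map pvIdOf := by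
  induction l generalizing acc with
  | nil => simp
  | cons x t ih => simp [List.foldl, ih]

-- B's fold, once seeded, carries (running max, running min).
theorem pv_fold2_some (l : List (List (String × Int))) (hi lo : Int) :
    l.foldl pvStep (some (hi, lo))
    = some ((l.map pvIdOf).foldl max hi, (l.map pvIdOf).foldl min lo) := by
  induction l generalizing hi lo with
  | nil => simp
  | cons x t ih =>
    simp only [List.foldl, List.map, pvStep]
    rw [ih]
    congr 2 <;> [skip; skip] <;> congr 1 <;> omega

theorem id_gen_eq (mode_ : String) (list_ : List (List (String × Int))) :
    id_gen mode_ list_ = id_gen_alt mode_ list_ := by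
  unfold id_gen id_gen_alt
  cases list_ with
  | nil => simp
  | cons x t =>
    simp only [pv_foldl_append_eq_map, List.nil_append, List.map, List.foldl, pvStep]
    rw [pv_fold2_some]
    simp [PySem.List.max?_id_cons, PySem.List.min?_id_cons]

-- ===== VERDICT (by name: the statement is the Claim_ definition above) =====
theorem id_gen_spec : Claim_equal_id_gen := by
  intro mode_ list_ _ _
  unfold Spec_id_gen
  exact id_gen_eq mode_ list_
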